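-- pv_equiv track=rewrite | github.com/renta0426/NVIDIA-Nemotron-Model-Reasoning-Challenge | cuda-train-data-analysis-v1/code/train_data_analysis_v1.py | glyph_unique_topological_order
-- ===== SOURCE A (Python) =====
-- def glyph_unique_topological_order(nodes: list[str], edges: dict[str, set[str]]) -> tuple[bool, list[str]]:
--     indegree = {node: 0 for node in nodes}
--     filtered_edges = {node: set() for node in nodes}
--     for left_node, right_nodes in edges.items():
--         if left_node not in indegree:
--             continue
--         for right_node in right_nodes:
--             if right_node not in indegree or right_node in filtered_edges[left_node]:
--                 continue
--             filtered_edges[left_node].add(right_node)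
--             indegree[right_node] += 1
--     queue = sorted(node for node, degree in indegree.items() if degree == 0)
--     order: list[str] = []
--     while queue:
--         if len(queue) > 1:
--             return False, []
--         node = queue.pop(0)
--         order.append(node)
--         for neighbor in sorted(filtered_edges[node]):
--             indegree[neighbor] -= 1
--             if indegree[neighbor] == 0:
--                 queue.append(neighbor)
--                 queue.sort()
--     return (len(order) == len(nodes), order if len(order) == len(nodes) else [])
-- ===== SOURCE B (Python) =====
-- def glyph_unique_topological_order(nodes: list[str], edges: dict[str, set[str]]) -> tuple[bool, list[str]]:
--     # Round-based source elimination: no indegree counters, no queue, no sorting.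
--     seen = set()
--     uniq = [n for n in nodes if not (n in seen or seen.add(n))]
--     nset = seen
--     adj = {n: {m for m in edges.get(n, ()) if m in nset} for n in uniq}
--     remaining = set(uniq)
--     order: list[str] = []
--     while remaining:
--         covered = set()
--         for m in remaining:
--             covered |= adj[m]
--         zeros = remaining - covered
--         if len(zeros) != 1:
--             return False, []
--         node = zeros.pop()
--         order.append(node)
--         remaining.discard(node)
--     return (len(order) == len(nodes), order if len(order) == len(nodes) else [])
-- ===== Notes on version B (the rewrite author's own statement) =====
-- stated objective: alternative
-- what changed: Replaces A's Kahn loop with incremental indegree maintenance and a sorted queue by round-based source elimination: each round collects the targets of the remaining nodes with set unions and removes the unique uncovered (source) node; no indegree counters, no queue, no sorting.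
import Mathlib
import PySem

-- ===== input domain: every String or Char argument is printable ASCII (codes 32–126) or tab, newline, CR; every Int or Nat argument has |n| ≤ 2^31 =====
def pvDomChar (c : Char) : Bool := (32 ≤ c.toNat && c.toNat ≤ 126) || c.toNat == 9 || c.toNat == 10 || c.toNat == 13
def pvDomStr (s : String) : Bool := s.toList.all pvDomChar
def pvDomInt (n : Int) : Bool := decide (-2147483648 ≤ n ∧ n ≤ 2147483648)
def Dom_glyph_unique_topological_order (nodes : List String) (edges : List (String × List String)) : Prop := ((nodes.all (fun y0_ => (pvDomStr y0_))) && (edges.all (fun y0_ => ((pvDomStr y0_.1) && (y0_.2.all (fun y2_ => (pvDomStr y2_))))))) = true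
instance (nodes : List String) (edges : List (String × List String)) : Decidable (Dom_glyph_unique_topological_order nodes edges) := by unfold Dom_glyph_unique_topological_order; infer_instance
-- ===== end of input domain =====

-- B replaces A's Kahn loop (incremental indegrees + sorted queue) by round-based rescans for the unique
-- source among the remaining nodes; alternative decomposition, not claimed faster.


-- ===== PORT A =====
-- A's while loop; fuel = nodes.length + 1 always suffices (each iteration removes one
-- remaining node; proved in the equivalence proof).  Early `return False, []` is the
-- (false, []) branches; loop exit returns the function's final tuple.
def pvLoopA (L : Nat) : Nat → List String → List String → PySem.Dict String Int → PySem.Dict String (List String) → Bool × List String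
  | 0, _, _, _, _ => (false, [])
  | fuel+1, queue, order, ind, flt =>
    match queue with
    | [] => (decide (order.length = L), if order.length = L then order else [])
    | node :: rest =>
      -- len(queue) > 1  (queue = node :: rest)
      if rest.length + 1 > 1 then (false, [])
      else
        let s := (PySem.List.sorted (flt.getD node []) (fun x => x) false).foldl
          (fun (s : PySem.Dict String Int × List String) nb =>
            let ind2 := s.1.modify nb 0 (· - 1)      -- indegree[neighbor] -= 1 (key always present)
            if ind2.getD nb 0 == 0 then (ind2, PySem.List.sorted (s.2 ++ [nb]) (fun x => x) false)
            else (ind2, s.2)) (ind, rest)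
        pvLoopA L fuel s.2 (order ++ [node]) s.1 flt

def glyph_unique_topological_order (nodes : List String) (edges : List (String × List String)) : Bool × List String :=
  let ind0 : PySem.Dict String Int := nodes.foldl (fun d n => d.insert n 0) PySem.Dict.empty
  let flt0 : PySem.Dict String (List String) := nodes.foldl (fun d n => d.insert n []) PySem.Dict.empty
  -- the Python receives `edges` as a dict: duplicate keys collapse (last value, first position)
  let ed : PySem.Dict String (List String) := edges.foldl (fun d p => d.insert p.1 p.2) PySem.Dict.empty
  -- edge-filtering loop; iterating the value list equals iterating the Python set: the
  -- `right_node in filtered_edges[left_node]` check skips repeated elements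
  let s := ed.items.foldl
    (fun (s : PySem.Dict String Int × PySem.Dict String (List String)) p =>
      if !s.1.contains p.1 then s
      else p.2.foldl (fun (s : PySem.Dict String Int × PySem.Dict String (List String)) r =>
        if !s.1.contains r || (s.2.getD p.1 []).contains r then s
        else (s.1.modify r 0 (· + 1), s.2.insert p.1 (PySem.Set.add (s.2.getD p.1 []) r))) s)
    (ind0, flt0)
  let queue := PySem.List.sorted ((s.1.items.filter (fun p => p.2 == 0)).map (·.1)) (fun x => x) false
  pvLoopA nodes.length (nodes.length + 1) queue [] s.1 s.2

-- ===== PORT B =====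
-- B's while loop: per round, the targets of remaining nodes are collected and the
-- sources are the remaining nodes not covered; demand exactly one per round.
def pvLoopB (L : Nat) (adj : PySem.Dict String (List String)) (remaining order : List String) : Bool × List String :=
  if _hr : remaining = [] then (decide (order.length = L), if order.length = L then order else [])
  else
    match hz : PySem.Set.diff remaining
        (remaining.foldl (fun s m => PySem.Set.update s (adj.getD m [])) []) with
    | [z] =>
      pvLoopB L adj (remaining.erase z) (order ++ [z])
    | _ => (false, [])
termination_by remaining.length
decreasing_by
  have hzmem : z ∈ remaining := by
    have hmem : z ∈ PySem.Set.diff remaining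
        (remaining.foldl (fun s m => PySem.Set.update s (adj.getD m [])) []) := by
      rw [hz]; exact List.mem_singleton_self z
    exact ((PySem.Set.mem_diff _ _ _).mp hmem).1
  have h1 := List.length_erase_of_mem hzmem
  have h2 := List.length_pos_of_mem hzmem
  simp only [h1]
  omega

def glyph_unique_topological_order_alt (nodes : List String) (edges : List (String × List String)) : Bool × List String :=
  let uniq : List String := PySem.Set.ofList nodes
  let ed : PySem.Dict String (List String) := edges.foldl (fun d p => d.insert p.1 p.2) PySem.Dict.empty
  let adj : PySem.Dict String (List String) := uniq.foldl
    (fun d n => d.insert n (PySem.Set.ofList ((ed.getD n []).filter (fun r => PySem.Set.contains uniq r)))) PySem.Dict.empty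
  pvLoopB nodes.length adj uniq []

-- ===== PRECONDITION & SPEC =====
def Spec_glyph_unique_topological_order (nodes : List String) (edges : List (String × List String)) (out : Bool × List String) : Prop := out = glyph_unique_topological_order_alt nodes edges
instance (nodes : List String) (edges : List (String × List String)) (out : Bool × List String) : Decidable (Spec_glyph_unique_topological_order nodes edges out) := by unfold Spec_glyph_unique_topological_order; infer_instance

-- ===== CLAIM (what is proved, stated in full; the proofs are below) =====
def Claim_equal_glyph_unique_topological_order : Prop := ∀ (nodes : List String) (edges : List (String × List String)), Dom_glyph_unique_topological_order nodes edges → Spec_glyph_unique_topological_order nodes edges (glyph_unique_topological_order nodes edges)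

-- ===== LEMMAS AND PROOFS =====

-- number of remaining nodes with an edge into n
def pvCnt (G : PySem.Dict String (List String)) (R : List String) (n : String) : Nat :=
  (R.filter (fun m => (G.getD m []).contains n)).length

-- the current sources among R
def pvZeros (G : PySem.Dict String (List String)) (R : List String) : List String :=
  R.filter (fun n => decide (pvCnt G R n = 0))


-- length of a filter after erasing one element of a Nodup list
theorem pvFilterLenErase (R : List String) (_hnd : R.Nodup) (x : String) (hx : x ∈ R) (p : String → Bool) :
    (R.filter p).length = ((R.erase x).filter p).length + (if p x then 1 else 0) := by
  have hperm : R.Perm (x :: R.erase x) := List.perm_cons_erase hx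
  rw [(hperm.filter p).length_eq, List.filter_cons]
  split <;> simp

-- membership in the covered-targets accumulator
theorem pvCoveredMem (G : PySem.Dict String (List String)) (R : List String) (n : String) :
    ∀ s0 : PySem.Set String,
    n ∈ R.foldl (fun s m => PySem.Set.update s (G.getD m [])) s0 ↔
      n ∈ s0 ∨ ∃ m ∈ R, n ∈ G.getD m [] := by
  induction R with
  | nil => intro s0; simp
  | cons a t ih =>
    intro s0
    rw [List.foldl_cons, ih, PySem.Set.mem_update]
    constructor
    · rintro ((h | h) | ⟨m, hm, h⟩)
      · exact Or.inl h
      · exact Or.inr ⟨a, List.mem_cons_self, h⟩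
      · exact Or.inr ⟨m, List.mem_cons_of_mem a hm, h⟩
    · rintro (h | ⟨m, hm, h⟩)
      · exact Or.inl (Or.inl h)
      · rcases List.mem_cons.mp hm with rfl | hm
        · exact Or.inl (Or.inr h)
        · exact Or.inr ⟨m, hm, h⟩

-- B's literal source scan is pvZeros
theorem pvZerosEq (G : PySem.Dict String (List String)) (R : List String) :
    PySem.Set.diff R (R.foldl (fun s m => PySem.Set.update s (G.getD m [])) []) = pvZeros G R := by
  show R.filter _ = _
  unfold pvZeros pvCnt
  apply List.filter_congr
  intro n _
  have hcontc : (List.foldl (fun s m => PySem.Set.update s (G.getD m [])) [] R).contains n = true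
      ↔ (∃ m ∈ R, n ∈ G.getD m []) := by
    rw [PySem.Set.contains_iff, pvCoveredMem G R n []]
    simp
  rw [Bool.eq_iff_iff]
  simp only [Bool.not_eq_true', decide_eq_true_eq, List.length_eq_zero_iff, List.filter_eq_nil_iff]
  constructor
  · intro h m hm hc
    have hcc : (List.foldl (fun s m => PySem.Set.update s (G.getD m [])) [] R).contains n = true :=
      hcontc.mpr ⟨m, hm, (PySem.Set.contains_iff _ _).mp hc⟩
    rw [h] at hcc
    exact Bool.false_ne_true hcc
  · intro h
    rw [← Bool.not_eq_true]
    intro hc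
    obtain ⟨m, hm, hmem⟩ := hcontc.mp hc
    exact h m hm ((PySem.Set.contains_iff _ _).mpr hmem)

-- effect of A's neighbor loop on (indegree, queue)
theorem pvInner (ns : List String) (hnd : ns.Nodup) :
    ∀ (ind : PySem.Dict String Int) (q : List String),
    (∀ n, (ns.foldl (fun (s : PySem.Dict String Int × List String) nb =>
            let ind2 := s.1.modify nb 0 (· - 1)
            if ind2.getD nb 0 == 0 then (ind2, PySem.List.sorted (s.2 ++ [nb]) (fun x => x) false)
            else (ind2, s.2)) (ind, q)).1.getD n 0
        = ind.getD n 0 - (if n ∈ ns then 1 else 0))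
    ∧ (ns.foldl (fun (s : PySem.Dict String Int × List String) nb =>
            let ind2 := s.1.modify nb 0 (· - 1)
            if ind2.getD nb 0 == 0 then (ind2, PySem.List.sorted (s.2 ++ [nb]) (fun x => x) false)
            else (ind2, s.2)) (ind, q)).2.Perm
        (q ++ ns.filter (fun nb => ind.getD nb 0 == 1)) := by
  induction ns with
  | nil => intro ind q; simp
  | cons nb ns' ih =>
    intro ind q
    have hnb : nb ∉ ns' := (List.nodup_cons.mp hnd).1
    have hnd' : ns'.Nodup := (List.nodup_cons.mp hnd).2
    have hmod : ∀ n, (ind.modify nb 0 (· - 1)).getD n 0 = if n = nb then ind.getD nb 0 - 1 else ind.getD n 0 :=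
      fun n => PySem.Dict.getD_modify ind nb n 0 (· - 1)
    have hcond : ((ind.modify nb 0 (· - 1)).getD nb 0 == (0:Int)) = (ind.getD nb 0 == (1:Int)) := by
      rw [Bool.eq_iff_iff]
      simp only [beq_iff_eq, hmod nb, if_true]
      omega
    rw [List.foldl_cons]
    have hstep : (let ind2 := (ind, q).1.modify nb 0 (· - 1)
            if ind2.getD nb 0 == 0 then (ind2, PySem.List.sorted ((ind, q).2 ++ [nb]) (fun x => x) false)
            else (ind2, (ind, q).2))
        = (ind.modify nb 0 (· - 1),
           if ind.getD nb 0 == 1 then PySem.List.sorted (q ++ [nb]) (fun x => x) false else q) := by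
      dsimp only
      rw [hcond]
      split <;> rfl
    rw [hstep]
    obtain ⟨ih1, ih2⟩ := ih hnd' (ind.modify nb 0 (· - 1))
        (if ind.getD nb 0 == 1 then PySem.List.sorted (q ++ [nb]) (fun x => x) false else q)
    constructor
    · intro n
      rw [ih1 n, hmod n]
      by_cases hn : n = nb
      · subst hn; simp [hnb]
      · simp [hn, List.mem_cons]
    · have hfilt : ns'.filter (fun nb' => (ind.modify nb 0 (· - 1)).getD nb' 0 == 1)
          = ns'.filter (fun nb' => ind.getD nb' 0 == 1) := by
        apply List.filter_congr; intro nb' h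
        rw [hmod nb', if_neg (by rintro rfl; exact hnb h)]
      rw [hfilt] at ih2
      refine ih2.trans ?_
      by_cases hc : (ind.getD nb 0 == (1:Int)) = true
      · rw [if_pos hc, List.filter_cons, if_pos hc]
        refine ((PySem.List.sorted_perm _ _ _).append_right _).trans ?_
        simp
      · rw [if_neg hc, List.filter_cons, if_neg hc]


-- one-step unfolding of B's loop, with the source scan named pvZeros
theorem pvLoopB_eq (L : Nat) (adj : PySem.Dict String (List String)) (R order : List String) :
    pvLoopB L adj R order
      = if R = [] then (decide (order.length = L), if order.length = L then order else [])
        else match pvZeros adj R with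
          | [z] => pvLoopB L adj (R.erase z) (order ++ [z])
          | _ => (false, []) := by
  rw [pvLoopB, pvZerosEq]
  by_cases hR : R = []
  · simp [hR]
  · simp only [dif_neg hR, if_neg hR]
    cases h : pvZeros adj R with
    | nil => rfl
    | cons a t => cases t <;> rfl

-- value list accumulated for key m across an item list
def pvVE (E : List (String × List String)) (m : String) : List String :=
  (E.filter (fun p => p.1 == m)).flatMap (fun p => p.2)

-- the filtered adjacency both programs compute, as a function of the node and edge data
def pvAdjF (nodes : List String) (E : List (String × List String)) (m : String) : List String :=
  if m ∈ nodes then PySem.Set.ofList ((pvVE E m).filter (fun r => decide (r ∈ nodes))) else []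

theorem pvGetFoldlInsert {V : Type} (f : String → V) :
    ∀ (l : List String) (d : PySem.Dict String V) (m : String),
    (l.foldl (fun d n => d.insert n (f n)) d).get? m = if m ∈ l then some (f m) else d.get? m := by
  intro l
  induction l using List.reverseRecOn with
  | nil => intro d m; simp
  | append_singleton l x ih =>
    intro d m
    rw [List.foldl_append, List.foldl_cons, List.foldl_nil, PySem.Dict.get?_insert, ih]
    by_cases hm : m = x
    · subst hm; simp
    · simp [hm, List.mem_append]

theorem pvVE_append (E : List (String × List String)) (p : String × List String) (m : String) :
    pvVE (E ++ [p]) m = pvVE E m ++ (if p.1 == m then p.2 else []) := by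
  unfold pvVE
  rw [List.filter_append, List.flatMap_append]
  congr 1
  cases h : (p.1 == m) <;> simp [h]

theorem pvFilterFstNodup :
    ∀ (l : List (String × List String)), (l.map Prod.fst).Nodup →
    ∀ m v, (m, v) ∈ l → l.filter (fun p => p.1 == m) = [(m, v)] := by
  intro l
  induction l with
  | nil => simp
  | cons a t ih =>
    intro hnd m v hm
    have hnd2 : (a.1 :: t.map Prod.fst).Nodup := by simpa using hnd
    have hh : a.1 ∉ t.map Prod.fst ∧ (t.map Prod.fst).Nodup := List.nodup_cons.mp hnd2
    rw [List.filter_cons]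
    rcases List.mem_cons.mp hm with h | h
    · subst h
      simp only [beq_self_eq_true, if_pos]
      have : t.filter (fun p => p.1 == m) = [] := by
        rw [List.filter_eq_nil_iff]
        intro p hp hbeq
        exact hh.1 (by
          have : p.1 = m := by simpa using hbeq
          rw [← this]
          exact List.mem_map.mpr ⟨p, hp, rfl⟩)
      rw [this]
    · have hma : a.1 ≠ m := by
        rintro rfl
        exact hh.1 (List.mem_map.mpr ⟨(a.1, v), h, rfl⟩)
      rw [if_neg (by simpa using hma)]
      exact ih hh.2 m v h

theorem pvVE_getD (d : PySem.Dict String (List String)) (hnd : d.keys.Nodup) (m : String) :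
    pvVE d.items m = d.getD m [] := by
  cases h : d.get? m with
  | none =>
    rw [PySem.Dict.getD_of_get?_eq_none d [] h]
    unfold pvVE
    have hfil : d.items.filter (fun p => p.1 == m) = [] := by
      rw [List.filter_eq_nil_iff]
      intro p hp hbeq
      have hk : p.1 ∈ d.keys := PySem.Dict.mem_keys_of_mem_items d hp
      have : p.1 = m := by simpa using hbeq
      rw [this] at hk
      exact ((PySem.Dict.get?_eq_none_iff_not_mem_keys d m).mp h) hk
    rw [hfil]
    rfl
  | some v =>
    have hkeys : (d.items.map Prod.fst).Nodup := hnd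
    unfold pvVE
    rw [pvFilterFstNodup d.items hkeys m v (PySem.Dict.mem_items_of_get?_eq_some d h)]
    simp [PySem.Dict.getD_eq_get?_getD, h]

theorem pvFilterLenMono (R : List String) (hnd : R.Nodup) (x : String) (hx : x ∈ R)
    (p p' : String → Bool)
    (hagree : ∀ m ∈ R, m ≠ x → p' m = p m) (hmono : p x = true → p' x = true) :
    (R.filter p').length = (R.filter p).length + (if p' x = true ∧ p x = false then 1 else 0) := by
  rw [pvFilterLenErase R hnd x hx p', pvFilterLenErase R hnd x hx p]
  have hxer : x ∉ R.erase x := hnd.not_mem_erase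
  have hcongr : (R.erase x).filter p' = (R.erase x).filter p := by
    apply List.filter_congr
    intro m hm
    exact hagree m (List.mem_of_mem_erase hm) (fun he => hxer (he ▸ hm))
  rw [hcongr]
  cases hp : p x <;> cases hp' : p' x <;> simp_all

-- A's inner edge loop for one key `left`
theorem pvEdgeInner (nodes : List String) (left : String) :
    ∀ (rights : List String) (ind : PySem.Dict String Int) (flt : PySem.Dict String (List String)) (S : List String),
    (∀ r, ind.contains r = decide (r ∈ nodes)) →
    flt.get? left = some S →
    ((rights.foldl (fun (s : PySem.Dict String Int × PySem.Dict String (List String)) r =>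
        if !s.1.contains r || (s.2.getD left []).contains r then s
        else (s.1.modify r 0 (· + 1), s.2.insert left (PySem.Set.add (s.2.getD left []) r))) (ind, flt)).1.keys = ind.keys)
    ∧ (∀ m, (rights.foldl (fun (s : PySem.Dict String Int × PySem.Dict String (List String)) r =>
        if !s.1.contains r || (s.2.getD left []).contains r then s
        else (s.1.modify r 0 (· + 1), s.2.insert left (PySem.Set.add (s.2.getD left []) r))) (ind, flt)).2.get? m
        = if m = left then some (PySem.Set.update S (rights.filter (fun r => decide (r ∈ nodes)))) else flt.get? m)
    ∧ (∀ n, (rights.foldl (fun (s : PySem.Dict String Int × PySem.Dict String (List String)) r =>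
        if !s.1.contains r || (s.2.getD left []).contains r then s
        else (s.1.modify r 0 (· + 1), s.2.insert left (PySem.Set.add (s.2.getD left []) r))) (ind, flt)).1.getD n 0
        = ind.getD n 0 + (if n ∈ PySem.Set.update S (rights.filter (fun r => decide (r ∈ nodes))) ∧ n ∉ S then 1 else 0)) := by
  intro rights
  induction rights with
  | nil =>
    intro ind flt S hcont hS
    have hgd : flt.getD left [] = S := by rw [PySem.Dict.getD_eq_get?_getD, hS]; rfl
    refine ⟨rfl, ?_, ?_⟩
    · intro m
      by_cases hm : m = left
      · subst hm
        simp only [List.foldl_nil, List.filter_nil, PySem.Set.update]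
        exact hS
      · simp [hm]
    · intro n
      simp [PySem.Set.update]
  | cons r rs ih =>
    intro ind flt S hcont hS
    have hgd : flt.getD left [] = S := by rw [PySem.Dict.getD_eq_get?_getD, hS]; rfl
    rw [List.foldl_cons]
    by_cases hrn : r ∈ nodes
    · by_cases hrS : r ∈ S
      · -- already in the set: skip
        have hc : (!ind.contains r || (flt.getD left []).contains r) = true := by
          rw [hgd]
          simp [hrS]
        rw [if_pos hc]
        obtain ⟨k1, k2, k3⟩ := ih ind flt S hcont hS
        have hfil : (r :: rs).filter (fun r => decide (r ∈ nodes)) = r :: rs.filter (fun r => decide (r ∈ nodes)) :=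
          List.filter_cons_of_pos (by simpa using hrn)
        have hupd : PySem.Set.update S ((r :: rs).filter (fun r => decide (r ∈ nodes)))
            = PySem.Set.update S (rs.filter (fun r => decide (r ∈ nodes))) := by
          rw [hfil, PySem.Set.update_cons, PySem.Set.add_of_mem hrS]
        rw [hupd]
        exact ⟨k1, k2, k3⟩
      · -- new element: add it and bump the indegree
        have hc : (!ind.contains r || (flt.getD left []).contains r) = false := by
          rw [hgd, hcont r]
          simp [hrn, hrS]
        rw [if_neg (by rw [hc]; exact Bool.false_ne_true)]
        have hS' : (flt.insert left (PySem.Set.add (flt.getD left []) r)).get? left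
            = some (PySem.Set.add S r) := by
          rw [hgd]; exact PySem.Dict.get?_insert_self _ _ _
        have hcont' : ∀ r', (ind.modify r 0 (· + 1)).contains r' = decide (r' ∈ nodes) := by
          intro r'
          rw [PySem.Dict.contains_modify, hcont r']
          by_cases h' : r' = r
          · subst h'; simp [hrn]
          · simp [h']
        obtain ⟨k1, k2, k3⟩ := ih (ind.modify r 0 (· + 1))
          (flt.insert left (PySem.Set.add (flt.getD left []) r)) (PySem.Set.add S r) hcont' hS'
        have hfil : (r :: rs).filter (fun r => decide (r ∈ nodes)) = r :: rs.filter (fun r => decide (r ∈ nodes)) :=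
          List.filter_cons_of_pos (by simpa using hrn)
        have hupd : PySem.Set.update S ((r :: rs).filter (fun r => decide (r ∈ nodes)))
            = PySem.Set.update (PySem.Set.add S r) (rs.filter (fun r => decide (r ∈ nodes))) := by
          rw [hfil, PySem.Set.update_cons]
        refine ⟨?_, ?_, ?_⟩
        · rw [k1, PySem.Dict.keys_modify, PySem.Dict.keys_insert_of_contains]
          rw [hcont r]; simp [hrn]
        · intro m
          rw [k2 m, hupd]
          by_cases hm : m = left
          · simp [hm]
          · rw [if_neg hm, if_neg hm, PySem.Dict.get?_insert_of_ne _ _ hm]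
        · intro n
          rw [k3 n, hupd]
          have hmod : (ind.modify r 0 (· + 1)).getD n 0
              = if n = r then ind.getD n 0 + 1 else ind.getD n 0 := by
            rw [PySem.Dict.getD_modify]
            by_cases hn : n = r
            · subst hn; simp
            · simp [hn]
          rw [hmod]
          by_cases hn : n = r
          · subst hn
            have hmemadd : n ∈ PySem.Set.add S n := (PySem.Set.mem_add S n n).mpr (Or.inr rfl)
            have hmemupd : n ∈ PySem.Set.update (PySem.Set.add S n) (rs.filter (fun r => decide (r ∈ nodes))) :=
              (PySem.Set.mem_update _ _ _).mpr (Or.inl hmemadd)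
            rw [if_pos rfl, if_neg (fun h => h.2 hmemadd), if_pos ⟨hmemupd, hrS⟩]
            ring
          · have hiff : (n ∈ PySem.Set.add S r) ↔ (n ∈ S) := by
              rw [PySem.Set.mem_add]; simp [hn]
            simp [hn, hiff]
    · -- r not a node: skip
      have hc : (!ind.contains r || (flt.getD left []).contains r) = true := by
        rw [hcont r]
        simp [hrn]
      rw [if_pos hc]
      obtain ⟨k1, k2, k3⟩ := ih ind flt S hcont hS
      have hfil : (r :: rs).filter (fun r => decide (r ∈ nodes)) = rs.filter (fun r => decide (r ∈ nodes)) :=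
        List.filter_cons_of_neg (by simpa using hrn)
      rw [hfil]
      exact ⟨k1, k2, k3⟩

theorem pvAdjF_append_ne (nodes : List String) (E : List (String × List String))
    (p : String × List String) (m : String) (h : p.1 ≠ m) :
    pvAdjF nodes (E ++ [p]) m = pvAdjF nodes E m := by
  unfold pvAdjF
  rw [pvVE_append]
  have hb : (p.1 == m) = false := by simpa using h
  rw [hb]
  simp

-- A's edge-filtering loop: final filtered sets and indegrees
theorem pvEdge (nodes : List String) :
    ∀ (E : List (String × List String)), (E.map Prod.fst).Nodup →
    ((E.foldl (fun (s : PySem.Dict String Int × PySem.Dict String (List String)) p =>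
        if !s.1.contains p.1 then s
        else p.2.foldl (fun (s : PySem.Dict String Int × PySem.Dict String (List String)) r =>
          if !s.1.contains r || (s.2.getD p.1 []).contains r then s
          else (s.1.modify r 0 (· + 1), s.2.insert p.1 (PySem.Set.add (s.2.getD p.1 []) r))) s)
        (nodes.foldl (fun d n => d.insert n (0:Int)) PySem.Dict.empty,
         nodes.foldl (fun d n => d.insert n ([]:List String)) PySem.Dict.empty)).1.keys
      = (PySem.Set.ofList nodes : List String))
    ∧ (∀ m, (E.foldl (fun (s : PySem.Dict String Int × PySem.Dict String (List String)) p =>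
        if !s.1.contains p.1 then s
        else p.2.foldl (fun (s : PySem.Dict String Int × PySem.Dict String (List String)) r =>
          if !s.1.contains r || (s.2.getD p.1 []).contains r then s
          else (s.1.modify r 0 (· + 1), s.2.insert p.1 (PySem.Set.add (s.2.getD p.1 []) r))) s)
        (nodes.foldl (fun d n => d.insert n (0:Int)) PySem.Dict.empty,
         nodes.foldl (fun d n => d.insert n ([]:List String)) PySem.Dict.empty)).2.get? m
      = if m ∈ nodes then some (pvAdjF nodes E m) else none)
    ∧ (∀ n, (E.foldl (fun (s : PySem.Dict String Int × PySem.Dict String (List String)) p =>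
        if !s.1.contains p.1 then s
        else p.2.foldl (fun (s : PySem.Dict String Int × PySem.Dict String (List String)) r =>
          if !s.1.contains r || (s.2.getD p.1 []).contains r then s
          else (s.1.modify r 0 (· + 1), s.2.insert p.1 (PySem.Set.add (s.2.getD p.1 []) r))) s)
        (nodes.foldl (fun d n => d.insert n (0:Int)) PySem.Dict.empty,
         nodes.foldl (fun d n => d.insert n ([]:List String)) PySem.Dict.empty)).1.getD n 0
      = ((((PySem.Set.ofList nodes : List String)).filter
            (fun m => (pvAdjF nodes E m).contains n)).length : Int)) := by
  intro E
  induction E using List.reverseRecOn with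
  | nil =>
    intro _
    refine ⟨?_, ?_, ?_⟩
    · rw [List.foldl_nil]
      have h := PySem.Dict.keys_foldl_insert nodes (fun _ _ => (0:Int)) PySem.Dict.empty
      simpa [PySem.Set.update_nil_left] using h
    · intro m
      rw [List.foldl_nil, pvGetFoldlInsert (fun _ => ([]:List String)) nodes PySem.Dict.empty m]
      by_cases hm : m ∈ nodes <;> simp [hm, pvAdjF, pvVE]
    · intro n
      rw [List.foldl_nil]
      have hg := pvGetFoldlInsert (fun _ => (0:Int)) nodes PySem.Dict.empty n
      have hfil : ((PySem.Set.ofList nodes : List String)).filter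
          (fun m => (pvAdjF nodes [] m).contains n) = [] := by
        rw [List.filter_eq_nil_iff]
        intro m _
        simp [pvAdjF, pvVE]
      rw [hfil, PySem.Dict.getD_eq_get?_getD, hg]
      by_cases hm : n ∈ nodes <;> simp [hm]
  | append_singleton E p ih =>
    intro hnd
    have hndE : (E.map Prod.fst).Nodup := by
      rw [List.map_append] at hnd
      exact (List.nodup_append.mp hnd).1
    have hpE : p.1 ∉ E.map Prod.fst := by
      rw [List.map_append] at hnd
      have hdisj := (List.nodup_append.mp hnd).2.2
      intro hmem
      exact hdisj p.1 hmem p.1 (List.mem_map.mpr ⟨p, List.mem_singleton_self p, rfl⟩) rfl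
    obtain ⟨k1, k2, k3⟩ := ih hndE
    have hcontE : ∀ r, (E.foldl (fun (s : PySem.Dict String Int × PySem.Dict String (List String)) p =>
        if !s.1.contains p.1 then s
        else p.2.foldl (fun (s : PySem.Dict String Int × PySem.Dict String (List String)) r =>
          if !s.1.contains r || (s.2.getD p.1 []).contains r then s
          else (s.1.modify r 0 (· + 1), s.2.insert p.1 (PySem.Set.add (s.2.getD p.1 []) r))) s)
        (nodes.foldl (fun d n => d.insert n (0:Int)) PySem.Dict.empty,
         nodes.foldl (fun d n => d.insert n ([]:List String)) PySem.Dict.empty)).1.contains r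
        = decide (r ∈ nodes) := by
      intro r
      rw [PySem.Dict.contains_eq_decide_mem_keys, k1]
      simp [PySem.Set.mem_ofList]
    rw [List.foldl_append, List.foldl_cons, List.foldl_nil]
    by_cases hp : p.1 ∈ nodes
    · -- the key is a node: run the inner loop
      rw [if_neg (by rw [hcontE p.1]; simp [hp])]
      have hSE := k2 p.1
      rw [if_pos hp] at hSE
      obtain ⟨j1, j2, j3⟩ := pvEdgeInner nodes p.1 p.2 _ _ (pvAdjF nodes E p.1) hcontE hSE
      have hnewadj : pvAdjF nodes (E ++ [p]) p.1
          = PySem.Set.update (pvAdjF nodes E p.1) (p.2.filter (fun r => decide (r ∈ nodes))) := by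
        unfold pvAdjF
        rw [pvVE_append]
        simp only [beq_self_eq_true, if_true, if_pos hp]
        rw [List.filter_append, PySem.Set.ofList_append]
      refine ⟨?_, ?_, ?_⟩
      · rw [j1, k1]
      · intro m
        rw [j2 m]
        by_cases hm : m = p.1
        · subst hm
          rw [if_pos rfl, if_pos hp, hnewadj]
        · rw [if_neg hm, k2 m, pvAdjF_append_ne nodes E p m (fun he => hm he.symm)]
      · intro n
        rw [j3 n, k3 n]
        have hmem : p.1 ∈ (PySem.Set.ofList nodes : List String) := (PySem.Set.mem_ofList nodes p.1).mpr hp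
        have hlen := pvFilterLenMono (PySem.Set.ofList nodes) (PySem.Set.nodup_ofList nodes) p.1 hmem
          (fun m => (pvAdjF nodes E m).contains n)
          (fun m => (pvAdjF nodes (E ++ [p]) m).contains n)
          (fun m _ hne => by
            show (pvAdjF nodes (E ++ [p]) m).contains n = (pvAdjF nodes E m).contains n
            rw [pvAdjF_append_ne nodes E p m (fun he => hne he.symm)])
          (fun h => by
            show (pvAdjF nodes (E ++ [p]) p.1).contains n = true
            rw [hnewadj]
            have hin : n ∈ pvAdjF nodes E p.1 := by simpa using h
            have h2 : n ∈ PySem.Set.update (pvAdjF nodes E p.1)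
                (p.2.filter (fun r => decide (r ∈ nodes))) :=
              (PySem.Set.mem_update _ _ _).mpr (Or.inl hin)
            simpa using h2)
        rw [hlen]
        have hc1 : ((pvAdjF nodes (E ++ [p]) p.1).contains n = true)
            ↔ n ∈ PySem.Set.update (pvAdjF nodes E p.1) (p.2.filter (fun r => decide (r ∈ nodes))) := by
          rw [hnewadj]; simp
        have hc2 : ((pvAdjF nodes E p.1).contains n = false) ↔ n ∉ pvAdjF nodes E p.1 := by
          simp
        by_cases hb1 : n ∈ PySem.Set.update (pvAdjF nodes E p.1) (p.2.filter (fun r => decide (r ∈ nodes)))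
          <;> by_cases hb2 : n ∈ pvAdjF nodes E p.1 <;>
          · rw [if_congr (and_congr hc1 hc2) rfl rfl]
            simp only [hb1, hb2]
            push_cast
            simp
            try omega
    · -- key not among the nodes: skipped
      rw [if_pos (by rw [hcontE p.1]; simp [hp])]
      refine ⟨k1, ?_, ?_⟩
      · intro m
        rw [k2 m]
        by_cases hm : m ∈ nodes
        · have hne : p.1 ≠ m := fun he => hp (he ▸ hm)
          rw [if_pos hm, if_pos hm, pvAdjF_append_ne nodes E p m hne]
        · rw [if_neg hm, if_neg hm]
      · intro n
        rw [k3 n]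
        congr 2
        apply List.filter_congr
        intro m hm
        have hmn : m ∈ nodes := (PySem.Set.mem_ofList nodes m).mp hm
        rw [pvAdjF_append_ne nodes E p m (fun he => hp (he ▸ hmn))]

theorem pvSim (L : Nat) (nodes : List String) (GA GB : PySem.Dict String (List String))
    (hG : ∀ m, GA.getD m [] = GB.getD m [])
    (hGnd : ∀ m, (GB.getD m []).Nodup)
    (hGsub : ∀ m n, n ∈ GB.getD m [] → n ∈ nodes)
    (hL : (PySem.Set.ofList nodes : List String).length ≤ L) :
    ∀ (fuel : Nat) (R : List String), R.Nodup → (∀ n ∈ R, n ∈ nodes) →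
    ∀ (queue order : List String) (ind : PySem.Dict String Int),
    R.length + 1 ≤ fuel →
     order.length + R.length = (PySem.Set.ofList nodes : List String).length →
    (∀ n ∈ R, ind.getD n 0 = (pvCnt GB R n : Int)) →
    (∀ n, n ∈ nodes → n ∉ R → ind.getD n 0 ≤ 0) →
    queue.Perm (pvZeros GB R) →
    pvLoopA L fuel queue order ind GA = pvLoopB L GB R order := by
  intro fuel
  induction fuel with
  | zero => intro R _ _ q o ind hf; omega
  | succ f ihf =>
    intro R hRnd hRsub queue order ind hfuel hlen hcnt hneg hperm
    rcases hzs : pvZeros GB R with - | ⟨z, - | ⟨z2, zr⟩⟩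
    · -- no sources
      have hq : queue = [] := by
        rw [hzs] at hperm; exact hperm.eq_nil
      subst hq
      rw [pvLoopB_eq]
      by_cases hR : R = []
      · subst hR; simp [pvLoopA]
      · rw [if_neg hR, hzs]
        have hRlen : 1 ≤ R.length := by
          cases R with
          | nil => exact absurd rfl hR
          | cons a t => simp
        have hne : order.length ≠ L := by omega
        simp [pvLoopA, hne]
    · -- exactly one source z
      have hq : queue = [z] := by
        rw [hzs] at hperm; exact List.perm_singleton.mp hperm
      subst hq
      have hzmem : z ∈ R ∧ pvCnt GB R z = 0 := by
        have : z ∈ pvZeros GB R := by rw [hzs]; exact List.mem_singleton_self z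
        unfold pvZeros at this
        have h2 := List.of_mem_filter this
        exact ⟨List.mem_of_mem_filter this, of_decide_eq_true h2⟩
      have hRne : R ≠ [] := fun h => by simp [h] at hzmem
      -- unfold A one step
      rw [pvLoopB_eq, if_neg hRne, hzs]
      simp only [pvLoopA]
      rw [hG z]
      have hnsnd : (PySem.List.sorted (GB.getD z []) (fun x => x) false).Nodup :=
        (PySem.List.sorted_perm _ _ _).nodup_iff.mpr (hGnd z)
      obtain ⟨hi1, hi2⟩ := pvInner (PySem.List.sorted (GB.getD z []) (fun x => x) false) hnsnd ind []
      have hmemns : ∀ n, n ∈ PySem.List.sorted (GB.getD z []) (fun x => x) false ↔ n ∈ GB.getD z [] := by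
        intro n; exact (PySem.List.sorted_perm _ _ _).mem_iff
      rw [List.nil_append] at hi2
      have herase : ∀ n, pvCnt GB R n = pvCnt GB (R.erase z) n + (if (GB.getD z []).contains n then 1 else 0) := by
        intro n; exact pvFilterLenErase R hRnd z hzmem.1 _
      have hcontm : ∀ (l : List String) (n : String), (l.contains n = true) ↔ n ∈ l := by
        intro l n; simp
      -- apply the induction hypothesis
      have main := ihf (R.erase z) (hRnd.erase z)
        (fun n hn => hRsub n (List.mem_of_mem_erase hn))
        ((PySem.List.sorted (GB.getD z []) (fun x => x) false).foldl
          (fun (s : PySem.Dict String Int × List String) nb =>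
            let ind2 := s.1.modify nb 0 (· - 1)
            if ind2.getD nb 0 == 0 then (ind2, PySem.List.sorted (s.2 ++ [nb]) (fun x => x) false)
            else (ind2, s.2)) (ind, [])).2
        (order ++ [z])
        ((PySem.List.sorted (GB.getD z []) (fun x => x) false).foldl
          (fun (s : PySem.Dict String Int × List String) nb =>
            let ind2 := s.1.modify nb 0 (· - 1)
            if ind2.getD nb 0 == 0 then (ind2, PySem.List.sorted (s.2 ++ [nb]) (fun x => x) false)
            else (ind2, s.2)) (ind, [])).1
        ?hfuel ?hlen ?hcnt ?hneg ?hperm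
      case hfuel =>
        have := List.length_erase_of_mem hzmem.1
        have hRlen : 1 ≤ R.length := List.length_pos_of_mem hzmem.1
        omega
      case hlen =>
        have := List.length_erase_of_mem hzmem.1
        have hRlen : 1 ≤ R.length := List.length_pos_of_mem hzmem.1
        simp only [List.length_append, List.length_cons, List.length_nil]
        omega
      case hcnt =>
        intro n hn
        rw [hi1 n]
        have hnR : n ∈ R := List.mem_of_mem_erase hn
        rw [hcnt n hnR, herase n]
        by_cases hmem : n ∈ GB.getD z []
        · rw [if_pos ((hcontm _ _).mpr hmem), if_pos ((hmemns n).mpr hmem)]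
          push_cast; ring
        · rw [if_neg (fun h => hmem ((hcontm _ _).mp h)), if_neg (fun h => hmem ((hmemns n).mp h))]
          push_cast; ring
      case hneg =>
        intro n hnn hnR'
        rw [hi1 n]
        by_cases hnz : n = z
        · subst hnz
          rw [hcnt n hzmem.1, hzmem.2]
          split <;> omega
        · have hnR : n ∉ R := fun h => hnR' ((List.mem_erase_of_ne hnz).mpr h)
          have := hneg n hnn hnR
          split <;> omega
      case hperm =>
        refine hi2.trans ?_
        apply (List.perm_ext_iff_of_nodup (List.Nodup.filter _ hnsnd) (List.Nodup.filter _ (hRnd.erase z))).mpr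
        intro nb
        simp only [List.mem_filter, hmemns, beq_iff_eq, decide_eq_true_eq]
        constructor
        · rintro ⟨hnbz, hnb1⟩
          have hnbnodes : nb ∈ nodes := hGsub z nb hnbz
          have hnbR : nb ∈ R := by
            by_contra hno
            have := hneg nb hnbnodes hno
            omega
          have hnbne : nb ≠ z := by
            rintro rfl
            rw [hcnt nb hnbR] at hnb1
            rw [hzmem.2] at hnb1
            simp at hnb1
          have hcR : pvCnt GB R nb = 1 := by
            have := hcnt nb hnbR
            omega
          have : pvCnt GB (R.erase z) nb = 0 := by
            have h := herase nb
            rw [if_pos ((hcontm _ _).mpr hnbz)] at h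
            omega
          exact ⟨(List.mem_erase_of_ne hnbne).mpr hnbR, this⟩
        · rintro ⟨hnbR', hc0⟩
          have hnbR : nb ∈ R := List.mem_of_mem_erase hnbR'
          have hnbne : nb ≠ z := by
            rintro rfl
            exact (List.Nodup.not_mem_erase hRnd) hnbR'
          have hnbz : nb ∈ GB.getD z [] := by
            by_contra hno
            have h := herase nb
            rw [if_neg (fun hh => hno ((hcontm _ _).mp hh))] at h
            have : nb ∈ pvZeros GB R := by
              unfold pvZeros
              refine List.mem_filter.mpr ⟨hnbR, by simp; omega⟩
            rw [hzs] at this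
            exact hnbne (List.mem_singleton.mp this)
          refine ⟨hnbz, ?_⟩
          have h := herase nb
          rw [if_pos ((hcontm _ _).mpr hnbz)] at h
          have := hcnt nb hnbR
          omega
      exact main
    · -- two or more sources
      have hql : queue.length = (z :: z2 :: zr).length := by rw [← hzs]; exact hperm.length_eq
      have hRne : R ≠ [] := by
        have : z ∈ pvZeros GB R := by rw [hzs]; exact List.mem_cons_self
        intro h; rw [h] at this; simp [pvZeros] at this
      obtain ⟨q1, q2, qt, rfl⟩ : ∃ q1 q2 qt, queue = q1 :: q2 :: qt := by
        cases queue with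
        | nil => simp at hql
        | cons a t =>
          cases t with
          | nil => simp at hql
          | cons b t2 => exact ⟨a, b, t2, rfl⟩
      rw [pvLoopB_eq, if_neg hRne, hzs]
      simp [pvLoopA]


-- A's initial queue is (a sorted arrangement of) the initial sources
theorem pvQueuePerm (d : PySem.Dict String Int) (adj : PySem.Dict String (List String)) (U : List String)
    (hk : d.keys = U) (hnd : U.Nodup)
    (hched : ∀ n ∈ U, d.getD n 0 = (pvCnt adj U n : Int)) :
    (PySem.List.sorted ((d.items.filter (fun p => p.2 == 0)).map (·.1)) (fun x => x) false).Perm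
      (pvZeros adj U) := by
  have hitems := PySem.Dict.items_eq_map_keys d (hk ▸ hnd) (0:Int)
  rw [hitems, hk, List.filter_map, List.map_map]
  refine (PySem.List.sorted_perm _ _ _).trans ?_
  have heq : List.map ((fun (p : String × Int) => p.1) ∘ (fun k => (k, d.getD k 0)))
       (U.filter ((fun (p : String × Int) => p.2 == 0) ∘ (fun k => (k, d.getD k 0))))
     = pvZeros adj U := by
    rw [show ((fun (p : String × Int) => p.1) ∘ (fun k => (k, d.getD k 0))) = fun k => k from rfl]
    rw [show (List.map (fun k => k) (U.filter ((fun (p : String × Int) => p.2 == 0) ∘ (fun k => (k, d.getD k 0)))))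
      = U.filter ((fun (p : String × Int) => p.2 == 0) ∘ (fun k => (k, d.getD k 0))) from List.map_id' _]
    unfold pvZeros
    apply List.filter_congr
    intro n hn
    rw [show ((fun (p : String × Int) => p.2 == 0) ∘ (fun k => (k, d.getD k 0))) n = (d.getD n 0 == 0) from rfl]
    rw [hched n hn, Bool.eq_iff_iff]
    simp
  rw [heq]

theorem glyph_unique_topological_order_spec : Claim_equal_glyph_unique_topological_order := by
  intro nodes edges _
  unfold Spec_glyph_unique_topological_order
  unfold glyph_unique_topological_order glyph_unique_topological_order_alt
  dsimp only
  have hednd : (edges.foldl (fun d p => d.insert p.1 p.2) PySem.Dict.empty).keys.Nodup :=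
    PySem.Dict.nodup_keys_foldl_insert_key edges Prod.fst (fun _ p => p.2) PySem.Dict.empty
      PySem.Dict.nodup_keys_empty
  have hednd2 : ((edges.foldl (fun d p => d.insert p.1 p.2) PySem.Dict.empty).items.map Prod.fst).Nodup := by
    simpa [PySem.Dict.keys] using hednd
  obtain ⟨k1, k2, k3⟩ := pvEdge nodes (edges.foldl (fun d p => d.insert p.1 p.2) PySem.Dict.empty).items hednd2
  -- characterization of B's adjacency dict
  have hcontU : ∀ r, PySem.Set.contains (PySem.Set.ofList nodes) r = decide (r ∈ nodes) := by
    intro r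
    rw [Bool.eq_iff_iff, PySem.Set.contains_iff]
    simp [PySem.Set.mem_ofList]
  have hadjchar : ∀ m, ((PySem.Set.ofList nodes : List String).foldl
      (fun d n => d.insert n (PySem.Set.ofList
        (((edges.foldl (fun d p => d.insert p.1 p.2) PySem.Dict.empty).getD n []).filter
          (fun r => PySem.Set.contains (PySem.Set.ofList nodes) r)))) PySem.Dict.empty).getD m []
      = pvAdjF nodes (edges.foldl (fun d p => d.insert p.1 p.2) PySem.Dict.empty).items m := by
    intro m
    rw [PySem.Dict.getD_eq_get?_getD,
      pvGetFoldlInsert (fun n => PySem.Set.ofList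
        (((edges.foldl (fun d p => d.insert p.1 p.2) PySem.Dict.empty).getD n []).filter
          (fun r => PySem.Set.contains (PySem.Set.ofList nodes) r))) _ PySem.Dict.empty m]
    unfold pvAdjF
    rw [pvVE_getD _ hednd m]
    by_cases hm : m ∈ nodes
    · rw [if_pos ((PySem.Set.mem_ofList nodes m).mpr hm), if_pos hm]
      have : (fun r => PySem.Set.contains (PySem.Set.ofList nodes) r) = (fun r => decide (r ∈ nodes)) := by
        funext r; exact hcontU r
      rw [this]
      rfl
    · rw [if_neg (fun h => hm ((PySem.Set.mem_ofList nodes m).mp h)), if_neg hm]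
      rfl
  -- A's filtered dict agrees with B's adjacency dict
  have hG : ∀ m, ((edges.foldl (fun d p => d.insert p.1 p.2) PySem.Dict.empty).items.foldl
      (fun (s : PySem.Dict String Int × PySem.Dict String (List String)) p =>
        if !s.1.contains p.1 then s
        else p.2.foldl (fun (s : PySem.Dict String Int × PySem.Dict String (List String)) r =>
          if !s.1.contains r || (s.2.getD p.1 []).contains r then s
          else (s.1.modify r 0 (· + 1), s.2.insert p.1 (PySem.Set.add (s.2.getD p.1 []) r))) s)
      (nodes.foldl (fun d n => d.insert n (0:Int)) PySem.Dict.empty,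
       nodes.foldl (fun d n => d.insert n ([]:List String)) PySem.Dict.empty)).2.getD m []
      = pvAdjF nodes (edges.foldl (fun d p => d.insert p.1 p.2) PySem.Dict.empty).items m := by
    intro m
    rw [PySem.Dict.getD_eq_get?_getD, k2 m]
    by_cases hm : m ∈ nodes
    · rw [if_pos hm]; rfl
    · rw [if_neg hm]
      unfold pvAdjF
      rw [if_neg hm]
      rfl
  have hcntAll : ∀ n, ((edges.foldl (fun d p => d.insert p.1 p.2) PySem.Dict.empty).items.foldl
      (fun (s : PySem.Dict String Int × PySem.Dict String (List String)) p =>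
        if !s.1.contains p.1 then s
        else p.2.foldl (fun (s : PySem.Dict String Int × PySem.Dict String (List String)) r =>
          if !s.1.contains r || (s.2.getD p.1 []).contains r then s
          else (s.1.modify r 0 (· + 1), s.2.insert p.1 (PySem.Set.add (s.2.getD p.1 []) r))) s)
      (nodes.foldl (fun d n => d.insert n (0:Int)) PySem.Dict.empty,
       nodes.foldl (fun d n => d.insert n ([]:List String)) PySem.Dict.empty)).1.getD n 0
      = (pvCnt ((PySem.Set.ofList nodes : List String).foldl
          (fun d n => d.insert n (PySem.Set.ofList
            (((edges.foldl (fun d p => d.insert p.1 p.2) PySem.Dict.empty).getD n []).filter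
              (fun r => PySem.Set.contains (PySem.Set.ofList nodes) r)))) PySem.Dict.empty)
          (PySem.Set.ofList nodes) n : Int) := by
    intro n
    rw [k3 n]
    unfold pvCnt
    congr 2
    apply List.filter_congr
    intro m _
    rw [hadjchar m]
  refine pvSim nodes.length nodes _ _
    (fun m => by rw [hG m, hadjchar m]) ?hGnd ?hGsub (PySem.Set.length_ofList_le nodes)
    (nodes.length + 1) (PySem.Set.ofList nodes) (PySem.Set.nodup_ofList nodes)
    (fun n hn => (PySem.Set.mem_ofList nodes n).mp hn)
    _ [] _ ?hfuel (by simp) ?hcnt ?hneg ?hperm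
  case hGnd =>
    intro m
    rw [hadjchar m]
    unfold pvAdjF
    split
    · exact PySem.Set.nodup_ofList _
    · exact List.nodup_nil
  case hGsub =>
    intro m n hn
    rw [hadjchar m] at hn
    unfold pvAdjF at hn
    by_cases hm : m ∈ nodes
    · rw [if_pos hm] at hn
      have := (PySem.Set.mem_ofList _ n).mp hn
      have := List.mem_filter.mp this
      exact of_decide_eq_true this.2
    · rw [if_neg hm] at hn
      simp at hn
  case hfuel =>
    have := PySem.Set.length_ofList_le nodes
    omega
  case hcnt =>
    intro n _
    exact hcntAll n
  case hneg =>
    intro n hn hnot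
    exact absurd ((PySem.Set.mem_ofList nodes n).mpr hn) hnot
  case hperm =>
    exact pvQueuePerm _ _ _ k1 (PySem.Set.nodup_ofList nodes) (fun n _ => hcntAll n)
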